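/- GENERATED by mk_final_copies.py from the proof of the farm's unit `start_decoder.F1` (farm:start_decoder.F1.2: Proof.lean) as the
   re-elaboration sweep compiled it — do not edit. -/
import Asan.CheckWalk
import Vorbis.Spec.Units.start_decoder_F1
import Vorbis.Spec.Worked.start_decoder_F1_Lemmas

/-!
  Unit `start_decoder.F1` (0x11520c – 0x115266 + the stub 0x115307 – 0x115314; stb_vorbis_fixed.c 3963 – 3966):
  `f->floor_count = get_bits(f, 6) + 1 ; f->floor_config = setup_malloc(f, 1596 * floor_count) ; NULL → error(f, 3) ;
  longest_floorlist = 0 ; i = 0`.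

  The walk is cut at the three call returns (the cost of a walk is superlinear in the context): one lemma per stage, each from a
  cut point `Pt` (Lemmas.lean: `Frame` + `Hand` + `Mid g 5 5 6` over the snapshot arena + `rbp = f`) to the next, chained by
  `ReachVia.trans`. What a stage stores or a callee writes is summarised as ONE `Mem.SameExcept` with a literal list of windows,
  every window inside an allowed zone (`SpanOK`); `frame_carry` / `mid_step` then carry the cut point.
-/

namespace Vorbis.Spec.start_decoder_F1
open X86 X86.User Asan Vorbis Vorbis.Spec Vorbis.Spec.StartDecoder

set_option maxRecDepth 4000
set_option maxHeartbeats 4000000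

/-- **Stage 1** (0x11520c … 0x115219, line 3963): `mov esi, 6 ; mov rdi, rbp ; call get_bits`. From the entry assertion to the
cut point after the return, with the result `rax < 64`. -/
theorem stage1 (Lay : Layout) (hLay : Lay.hi = 0x1000000) (μ : Microarch) (hμ : UserX.MicroOK μ) (u₀ : State)
    (hcode : HasCodeNat Lay u₀ Vorbis.L.start_decoder.entry Vorbis.Code.code_start_decoder.nat Vorbis.L.start_decoder.size)
    (h_get_bits : ∀ (others : List Obj) (frames : List (Nat × FrameLayout)) (Blk : Block → Prop) (len : Nat),
      Calls Lay μ Vorbis.WayInv (Vorbis.conv u₀) Vorbis.L.get_bits.entry (Vorbis.Spec.get_bits.spec others frames Blk len))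
    (g : Ghost) (A : Arena × List Obj) (v : State) (hp : Pt u₀ g pc_F1 A.1 A v) :
    ReachVia Lay μ Vorbis.WayInv v
      (fun w => Pt u₀ g Vorbis.L.start_decoder.cut187 A.1 A w ∧ (w.reg .rax).toNat < 64) := by
  have hfr := hp.frame
  have hl := loc_of hfr hp.hand hp.mid
  have he := hfr.entry
  v_entry he
  simp only [depth] at he_room he_stack
  have hRA : g.R + 1480 = (g.e.reg .rsp).toNat := hl.r_ra
  have w_rip := hfr.rip
  have c_rsp : v.reg .rsp = g.e.reg .rsp - 1480 := by
    rw [hfr.rsp]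
    exact (eq_addr _ _ (by u_omega)).symm
  have c_rbp : v.reg .rbp = g.e.reg .rdi := by
    rw [hp.rbp]
    exact addr_toNat _
  have w_eq : Mem.EqOn Vorbis.L.textLo Vorbis.L.textHi u₀.mem v.mem := hfr.code
  have hdf : v.flags .df = false := (show abiInv _ from hfr.inv).1
  have hmx : v.mxcsr &&& 0x1F80 = 0x1F80 := (show abiInv _ from hfr.inv).2
  have hsse := Vorbis.sseOK_of_abiInv hfr.inv
  have hgb := h_get_bits A.2 g.frames' (g.Blk A) g.len
  u_walk hcode [hμ.vendor] until [Vorbis.L.start_decoder.cut187] span [Vorbis.L.textLo, Vorbis.L.textHi] side (v_side)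
  · v_inv
  · -- the precondition of get_bits(f, 6)
    have hun : ShadowUntouched v.mem s_115214.mem := by v_untouched
    have hrsp : (s_115214.reg .rsp).toNat + 8 = g.R := by
      rw [w_rsp]
      u_omega
    have hrdi : (s_115214.reg .rdi).toNat = g.f := by
      rw [w_rdi]
      rfl
    have hsame : Mem.SameExcept [⟨(g.e.reg .rsp).toNat - 1488, (g.e.reg .rsp).toNat - 1480⟩] v.mem s_115214.mem := by
      u_same
    have hbits : Bits (g.Blk A) g.len s_115214.mem g.f := by
      apply bits_carry hsame ?_ hp.mid.bits
      intro s hs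
      have e := List.mem_singleton.mp hs
      subst e
      have hoff := hl.f_off
      have h1 := hl.room
      have h2 := hl.top
      have eRA : g.RA = (g.e.reg .rsp).toNat := rfl
      simp only []
      omega
    refine ⟨hp.readerPre hrsp hun hrdi hbits, ?_⟩
    rw [bitsArg_def, w_rsi]
    decide
  · -- 0x115219: get_bits has returned
    v_after_call w_rsp_115214 w_mem_115214
    simp only [w_rdi_115214] at w_same
    have hpost : GetBitsSpecPost (g.Blk A) g.len (s_115214.reg .rdi).toNat (bitsArg s_115214) s_115214 s_115214r := w_post
    have hn : bitsArg s_115214 = 6 := by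
      rw [bitsArg_def, w_rsi_115214]
      decide
    have hrdi : (s_115214.reg .rdi).toNat = g.f := by
      rw [w_rdi_115214]
      rfl
    rw [hn, hrdi] at hpost
    have hsame : Mem.SameExcept [⟨(g.e.reg .rsp).toNat - 1888, (g.e.reg .rsp).toNat - 1480⟩,
        ⟨(g.e.reg .rdi).toNat + 48, (g.e.reg .rdi).toNat + 56⟩, ⟨(g.e.reg .rdi).toNat + 84, (g.e.reg .rdi).toNat + 96⟩,
        ⟨(g.e.reg .rdi).toNat + 136, (g.e.reg .rdi).toNat + 144⟩,
        ⟨(g.e.reg .rdi).toNat + 1484, (g.e.reg .rdi).toNat + 1749⟩,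
        ⟨(g.e.reg .rdi).toNat + 1752, (g.e.reg .rdi).toNat + 1784⟩] v.mem s_115214r.mem := by
      u_same
    have hall : ∀ s, s ∈ [(⟨(g.e.reg .rsp).toNat - 1888, (g.e.reg .rsp).toNat - 1480⟩ : Span),
        ⟨(g.e.reg .rdi).toNat + 48, (g.e.reg .rdi).toNat + 56⟩, ⟨(g.e.reg .rdi).toNat + 84, (g.e.reg .rdi).toNat + 96⟩,
        ⟨(g.e.reg .rdi).toNat + 136, (g.e.reg .rdi).toNat + 144⟩,
        ⟨(g.e.reg .rdi).toNat + 1484, (g.e.reg .rdi).toNat + 1749⟩,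
        ⟨(g.e.reg .rdi).toNat + 1752, (g.e.reg .rdi).toNat + 1784⟩] → SpanOK g false A.1.B A.1.L s := by
      intro s hs
      have eRA : g.RA = (g.e.reg .rsp).toNat := rfl
      have ef : g.f = (g.e.reg .rdi).toNat := rfl
      simp only [List.mem_cons, List.mem_nil_iff, or_false] at hs
      unfold SpanOK
      rcases hs with rfl | rfl | rfl | rfl | rfl | rfl <;> simp only [] <;> omega
    have hpl := plain_eqOn hl hsame hall
    have hrsp' : s_115214r.reg .rsp = addr g.R := by
      rw [w_rsp]
      exact eq_addr _ _ (by u_omega)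
    have hf2 : g.f + Off.sizeof.stb_vorbis ≤ 2 ^ 64 := by
      have := hl.f_hi
      simp only [voff]
      omega
    have hfr' : Frame u₀ g Vorbis.L.start_decoder.cut187 A s_115214r :=
      frame_carry hfr hl hsame hall w_rip hrsp' w_eq (Vorbis.abiInv_of w_df w_mx) (hfr.shadow.untouched hpl.1) hfr.offText
        (Arena.Extends.refl _)
    have hmid' : Mid g 5 5 6 A.1 A s_115214r.mem :=
      mid_step hp.mid hl hsame hall (hp.mid.env.eqOn hpl.1) (hp.mid.arena.frame hf2 hpl.2) hp.mid.noTemps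
        (Arena.Extends.refl _) hpost.bits.bits
    refine ReachVia.done ⟨⟨hfr', hp.hand, hmid', ?_⟩, ?_⟩
    · rw [w_kept .rbp rfl]
      exact hp.rbp
    · have := hpost.bits.result.2 (by omega)
      omega

/-- **Stage 2** (0x115219 … 0x11523f, lines 3963 – 3964): `lea r13d, [rax+1]`, the checked store of `f->floor_count`,
`imul esi, r13d, 1596 ; call setup_malloc`. To the cut point after the return: FL1 holds; rax = NULL and nothing changed, or rax is
a block of `1596 · floor_count` bytes allocated since the snapshot (the ghost arena grew). -/
theorem stage2 (Lay : Layout) (hLay : Lay.hi = 0x1000000) (μ : Microarch) (hμ : UserX.MicroOK μ) (u₀ : State)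
    (hcode : HasCodeNat Lay u₀ Vorbis.L.start_decoder.entry Vorbis.Code.code_start_decoder.nat Vorbis.L.start_decoder.size)
    (h_store4 : Asan.SmallCheck Lay μ Vorbis.WayInv (Vorbis.CodeOK u₀) [.rax, .rcx, .rdx] 4 Vorbis.L.__asan_store4_noabort.entry)
    (h_setup_malloc : ∀ (others : List Obj) (frames : List (Nat × FrameLayout)) (A : Arena),
      Calls Lay μ Vorbis.WayInv (Vorbis.conv u₀) Vorbis.L.setup_malloc.entry (Vorbis.Spec.setup_malloc.spec others frames A))
    (g : Ghost) (A : Arena × List Obj) (v : State) (hp : Pt u₀ g Vorbis.L.start_decoder.cut187 A.1 A v)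
    (hz : (v.reg .rax).toNat < 64) :
    ReachVia Lay μ Vorbis.WayInv v
      (fun w => ∃ A' : Arena × List Obj, Pt u₀ g Vorbis.L.start_decoder.cut188 A.1 A' w ∧
        (1 ≤ stb_vorbis.floor_count w.mem g.f ∧ stb_vorbis.floor_count w.mem g.f ≤ 64) ∧
        (w.reg .rax = 0 ∨ (w.reg .rax ≠ 0 ∧
          Since A.1 A'.1 ⟨(w.reg .rax).toNat, Off.sizeof.Floor * (stb_vorbis.floor_count w.mem g.f).toNat⟩))) := by
  have hfr := hp.frame
  have hl := loc_of hfr hp.hand hp.mid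
  have he := hfr.entry
  v_entry he
  simp only [depth] at he_room he_stack
  have hRA : g.R + 1480 = (g.e.reg .rsp).toNat := hl.r_ra
  have hfdef : g.f = (g.e.reg .rdi).toNat := rfl
  have hfhi := hl.f_hi
  have hflo := hl.f_lo
  have w_rip := hfr.rip
  have c_rsp : v.reg .rsp = g.e.reg .rsp - 1480 := by
    rw [hfr.rsp]
    exact (eq_addr _ _ (by u_omega)).symm
  have c_rbp : v.reg .rbp = g.e.reg .rdi := by
    rw [hp.rbp]
    exact addr_toNat _
  have w_eq : Mem.EqOn Vorbis.L.textLo Vorbis.L.textHi u₀.mem v.mem := hfr.code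
  have hdf : v.flags .df = false := (show abiInv _ from hfr.inv).1
  have hmx : v.mxcsr &&& 0x1F80 = 0x1F80 := (show abiInv _ from hfr.inv).2
  have hsse := Vorbis.sseOK_of_abiInv hfr.inv
  have hsm := h_setup_malloc A.2 g.frames' A.1
  u_walk hcode [hμ.vendor] until [Vorbis.L.start_decoder.cut188] span [Vorbis.L.textLo, Vorbis.L.textHi] side (v_side)
  · -- 0x115224: the check of the store to f->floor_count
    have hun : ShadowUntouched v.mem s_115224.mem := by v_untouched
    have hs := hp.mid.bits.site_field hp.mid.env.live 176 4 (by omega) (by omega) rfl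
    exact Vorbis.Spec.check_site hfr.shadow hun hs (by u_omega)
  · v_inv
  · -- 0x11523a: the precondition of setup_malloc(f, 1596 * floor_count)
    have hun : ShadowUntouched v.mem s_11523a.mem := by v_untouched
    have hrsp : (s_11523a.reg .rsp).toNat + 8 = g.R := by
      rw [w_rsp]
      u_omega
    have hrdi : (s_11523a.reg .rdi).toNat = g.f := by
      rw [w_rdi]
      rfl
    have hsame : Mem.SameExcept [⟨(g.e.reg .rsp).toNat - 1888, (g.e.reg .rsp).toNat - 1480⟩,
        ⟨(g.e.reg .rdi).toNat + 176, (g.e.reg .rdi).toNat + 180⟩] v.mem s_11523a.mem := by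
      u_same
    have hall : ∀ s, s ∈ [(⟨(g.e.reg .rsp).toNat - 1888, (g.e.reg .rsp).toNat - 1480⟩ : Span),
        ⟨(g.e.reg .rdi).toNat + 176, (g.e.reg .rdi).toNat + 180⟩] → SpanOK g false A.1.B A.1.L s := by
      intro s hs
      have eRA : g.RA = (g.e.reg .rsp).toNat := rfl
      simp only [List.mem_cons, List.mem_nil_iff, or_false] at hs
      unfold SpanOK
      rcases hs with rfl | rfl <;> simp only [] <;> omega
    have hpl := plain_eqOn hl hsame hall
    have hf2 : g.f + Off.sizeof.stb_vorbis ≤ 2 ^ 64 := by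
      simp only [voff]
      omega
    exact hp.arenaPre hrsp hun hrdi (hp.mid.arena.frame hf2 hpl.2)
  · -- 0x11523f: setup_malloc has returned
    v_after_call w_rsp_11523a w_mem_11523a
    have hrdi : (s_11523a.reg .rdi).toNat = g.f := by
      rw [w_rdi_11523a]
      rfl
    obtain ⟨n, hndef⟩ : ∃ n, n = 1596 * ((v.reg .rax).toNat + 1) := ⟨_, rfl⟩
    have hn : (s_11523a.reg .rsi).toNat % 2 ^ 32 = n := by
      rw [w_rsi_11523a, hndef]
      exact imul_val _ hz
    have hpost := w_post
    dsimp only [setup_malloc.spec] at hpost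
    rw [hn, hrdi] at hpost
    simp only [w_rdi_11523a] at w_same
    rw [hn] at w_same
    -- the value stored into f->floor_count, read back after the call
    have hfoff : (g.e.reg .rsp).toNat + 8 ≤ g.f ∨ g.f + 1808 ≤ 0x700000 ∨ 0x800000 ≤ g.f := hl.f_off
    have ha : (g.e.reg .rdi + 176).toNat = g.f + 176 := by u_omega
    have hsp : (g.e.reg .rsp - 1488).toNat = (g.e.reg .rsp).toNat - 1488 := by u_omega
    have hab := hp.mid.arena.bounds
    have h0 : (((v.mem.writeLE (g.e.reg Reg.rsp - 1488) 8 1135145).writeLE (g.e.reg Reg.rdi + 176) 4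
          (BitVec.setWidth 32 (v.reg Reg.rax + 1).toBitVec).toNat).writeLE
        (g.e.reg Reg.rsp - 1488) 8 1135167).readLE (g.e.reg .rdi + 176) 4
        = (BitVec.setWidth 32 (v.reg .rax + 1).toBitVec).toNat := by
      u_read
    have h1 : s_11523ar.mem.readLE (g.e.reg .rdi + 176) 4 = (BitVec.setWidth 32 (v.reg .rax + 1).toBitVec).toNat := by
      rw [← h0]
      apply w_same.readLE _ 4 (by omega)
      intro w hw
      simp only [List.mem_cons, List.mem_nil_iff, or_false] at hw
      rcases hw with rfl | rfl | rfl | rfl <;> simp only [shadowSpan] <;> omega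
    have hfc : stb_vorbis.floor_count s_11523ar.mem g.f = (((v.reg .rax).toNat + 1 : Nat) : Int) := by
      have ea : addr (g.f + 176) = g.e.reg .rdi + 176 := by
        rw [← addr_add_lit]
        exact congrArg (· + 176) (addr_toNat _)
      have e32 : s_11523ar.mem.u32 (g.f + 176) = (v.reg .rax).toNat + 1 := by
        show s_11523ar.mem.readLE (addr (g.f + 176)) 4 = _
        rw [ea, h1]
        exact lea_val _ hz
      show s_11523ar.mem.i32 (g.f + 176) = _
      rw [Mem.i32_of_u32_lt _ _ (by rw [e32]; omega), e32]
    have hrsp' : s_11523ar.reg .rsp = addr g.R := by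
      rw [w_rsp]
      exact eq_addr _ _ (by u_omega)
    have hrbp' : s_11523ar.reg .rbp = addr g.f := by
      rw [w_kept .rbp rfl]
      exact hp.rbp
    have eRA : g.RA = (g.e.reg .rsp).toNat := rfl
    have hfcb : 1 ≤ stb_vorbis.floor_count s_11523ar.mem g.f ∧ stb_vorbis.floor_count s_11523ar.mem g.f ≤ 64 := by
      rw [hfc]
      omega
    by_cases hfit : A.1.Fits n
    · -- the allocation succeeded: the ghost arena grows by the floor block
      obtain ⟨hrax, harena', hsh'⟩ := hpost.1 hfit
      have hfit' : A.1.S + 32 + r8 n ≤ A.1.T := hfit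
      have hr8 := le_r8 n
      have hsame : Mem.SameExcept [⟨(g.e.reg .rsp).toNat - 1888, (g.e.reg .rsp).toNat - 1480⟩,
          ⟨(g.e.reg .rdi).toNat + 176, (g.e.reg .rdi).toNat + 180⟩,
          ⟨(g.e.reg .rdi).toNat + 8, (g.e.reg .rdi).toNat + 12⟩,
          ⟨(g.e.reg .rdi).toNat + 128, (g.e.reg .rdi).toNat + 132⟩,
          shadowSpan (A.1.B + A.1.S + 32) (A.1.B + A.1.S + 32 + n)] v.mem s_11523ar.mem := by
        u_same
      have hall : ∀ s, s ∈ [(⟨(g.e.reg .rsp).toNat - 1888, (g.e.reg .rsp).toNat - 1480⟩ : Span),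
          ⟨(g.e.reg .rdi).toNat + 176, (g.e.reg .rdi).toNat + 180⟩,
          ⟨(g.e.reg .rdi).toNat + 8, (g.e.reg .rdi).toNat + 12⟩,
          ⟨(g.e.reg .rdi).toNat + 128, (g.e.reg .rdi).toNat + 132⟩,
          shadowSpan (A.1.B + A.1.S + 32) (A.1.B + A.1.S + 32 + n)] → SpanOK g true A.1.B A.1.L s := by
        intro s hs
        simp only [List.mem_cons, List.mem_nil_iff, or_false] at hs
        unfold SpanOK
        rcases hs with rfl | rfl | rfl | rfl | rfl <;> simp only [shadowSpan, true_and] <;> omega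
      have hbitsA : Bits (g.Blk A) g.len s_11523ar.mem g.f := by
        apply bits_carry hsame ?_ hp.mid.bits
        intro s hs
        simp only [List.mem_cons, List.mem_nil_iff, or_false] at hs
        rcases hs with rfl | rfl | rfl | rfl | rfl <;> simp only [shadowSpan] <;> omega
      have hsh'' : ShadowInv (A.1.newSetupObj n :: A.2) g.frames' g.R s_11523ar.mem := by
        have e : (s_11523a.reg .rsp).toNat + 8 = g.R := by
          rw [w_rsp_11523a]
          omega
        rw [e] at hsh'
        exact hsh'
      obtain ⟨henv', hh', hbits', hno', hoff'⟩ := hp.alloc harena' hsh'' hbitsA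
      have hext := A.1.extends_pushSetup n
      have hfr' : Frame u₀ g Vorbis.L.start_decoder.cut188 (A.1.pushSetup n, A.1.newSetupObj n :: A.2) s_11523ar :=
        frame_carry hfr hl hsame hall w_rip hrsp' w_eq (Vorbis.abiInv_of w_df w_mx) hsh'' hoff' hext
      have hmid' : Mid g 5 5 6 A.1 (A.1.pushSetup n, A.1.newSetupObj n :: A.2) s_11523ar.mem :=
        mid_step hp.mid hl hsame hall henv' harena' hno' hext hbits'
      refine ReachVia.done ⟨(A.1.pushSetup n, A.1.newSetupObj n :: A.2), ⟨hfr', hh', hmid', hrbp'⟩, hfcb, Or.inr ⟨?_, ?_⟩⟩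
      · intro h0
        rw [h0] at hrax
        have : (0 : Word).toNat = 0 := rfl
        omega
      · have hs := hp.mid.arena.since_pushSetup n
        have e1 : (s_11523ar.reg .rax).toNat = A.1.B + (A.1.S + 32) := by omega
        have e2 : Off.sizeof.Floor * (stb_vorbis.floor_count s_11523ar.mem g.f).toNat = n := by
          rw [hfc, hndef]
          simp only [voff]
          omega
        rw [e1, e2]
        exact hs
    · -- the allocation failed: rax = 0, nothing of the arena or the shadow changed
      obtain ⟨hrax, harena', hun', _hfailsame⟩ := hpost.2 hfit
      rw [w_mem_11523a] at hun'
      replace w_same := sameExcept_drop_shadow (ws := [⟨(g.e.reg .rsp - 1488).toNat - 80, (g.e.reg .rsp - 1488).toNat⟩,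
          ⟨(g.e.reg .rdi).toNat + 8, (g.e.reg .rdi).toNat + 12⟩,
          ⟨(g.e.reg .rdi).toNat + 128, (g.e.reg .rdi).toNat + 132⟩]) w_same hun' (by
        simp only [shadowSpan]
        omega)
      have hsame : Mem.SameExcept [⟨(g.e.reg .rsp).toNat - 1888, (g.e.reg .rsp).toNat - 1480⟩,
          ⟨(g.e.reg .rdi).toNat + 176, (g.e.reg .rdi).toNat + 180⟩,
          ⟨(g.e.reg .rdi).toNat + 8, (g.e.reg .rdi).toNat + 12⟩,
          ⟨(g.e.reg .rdi).toNat + 128, (g.e.reg .rdi).toNat + 132⟩] v.mem s_11523ar.mem := by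
        u_same
      have hall : ∀ s, s ∈ [(⟨(g.e.reg .rsp).toNat - 1888, (g.e.reg .rsp).toNat - 1480⟩ : Span),
          ⟨(g.e.reg .rdi).toNat + 176, (g.e.reg .rdi).toNat + 180⟩,
          ⟨(g.e.reg .rdi).toNat + 8, (g.e.reg .rdi).toNat + 12⟩,
          ⟨(g.e.reg .rdi).toNat + 128, (g.e.reg .rdi).toNat + 132⟩] → SpanOK g true A.1.B A.1.L s := by
        intro s hs
        simp only [List.mem_cons, List.mem_nil_iff, or_false] at hs
        unfold SpanOK
        rcases hs with rfl | rfl | rfl | rfl <;> simp only [true_and] <;> omega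
      have hshadow : Mem.EqOn 0xC00000 0xE00000 v.mem s_11523ar.mem := by
        apply hsame.eqOn
        intro s hs
        simp only [List.mem_cons, List.mem_nil_iff, or_false] at hs
        rcases hs with rfl | rfl | rfl | rfl <;> simp only [] <;> omega
      have hbitsA : Bits (g.Blk A) g.len s_11523ar.mem g.f := by
        apply bits_carry hsame ?_ hp.mid.bits
        intro s hs
        simp only [List.mem_cons, List.mem_nil_iff, or_false] at hs
        rcases hs with rfl | rfl | rfl | rfl <;> simp only [] <;> omega
      have hfr' : Frame u₀ g Vorbis.L.start_decoder.cut188 A s_11523ar :=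
        frame_carry hfr hl hsame hall w_rip hrsp' w_eq (Vorbis.abiInv_of w_df w_mx) (hfr.shadow.untouched hshadow)
          hfr.offText (Arena.Extends.refl _)
      have hmid' : Mid g 5 5 6 A.1 A s_11523ar.mem :=
        mid_step hp.mid hl hsame hall (hp.mid.env.eqOn hshadow) harena' hp.mid.noTemps (Arena.Extends.refl _) hbitsA
      exact ReachVia.done ⟨A, ⟨hfr', hp.hand, hmid', hrbp'⟩, hfcb, Or.inl hrax⟩

/-- **Stage 3** (0x11523f … 0x11526a / 0x115314, lines 3964 – 3966): the checked store of `f->floor_config`, the NULL test; then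
`longest_floorlist = 0 ; i = 0` (both from gcc's literal-0 slot `[rsp+24H]`) and the exit `AtF2 … 0`, or the stub
`error(f, VORBIS_outofmem)` up to its return (eax = 0). -/
theorem stage3 (Lay : Layout) (hLay : Lay.hi = 0x1000000) (μ : Microarch) (hμ : UserX.MicroOK μ) (u₀ : State)
    (hcode : HasCodeNat Lay u₀ Vorbis.L.start_decoder.entry Vorbis.Code.code_start_decoder.nat Vorbis.L.start_decoder.size)
    (h_store8 : Asan.SmallCheck Lay μ Vorbis.WayInv (Vorbis.CodeOK u₀) [.rax, .rcx, .rdx] 8 Vorbis.L.__asan_store8_noabort.entry)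
    (h_error : ∀ (others : List Obj) (frames : List (Nat × FrameLayout)),
      Calls Lay μ Vorbis.WayInv (Vorbis.conv u₀) Vorbis.L.error.entry (Vorbis.Spec.error.spec others frames))
    (g : Ghost) (A5 : Arena) (A : Arena × List Obj) (v : State) (hp : Pt u₀ g Vorbis.L.start_decoder.cut188 A5 A v)
    (hfcb : 1 ≤ stb_vorbis.floor_count v.mem g.f ∧ stb_vorbis.floor_count v.mem g.f ≤ 64)
    (halt : v.reg .rax = 0 ∨ (v.reg .rax ≠ 0 ∧
      Since A5 A.1 ⟨(v.reg .rax).toNat, Off.sizeof.Floor * (stb_vorbis.floor_count v.mem g.f).toNat⟩)) :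
    ReachVia Lay μ Vorbis.WayInv v
      (fun w => AtF2 u₀ g 0 w ∨ (Pt u₀ g Vorbis.L.start_decoder.cut192 A5 A w ∧ w.reg .rax = 0)) := by
  have hfr := hp.frame
  have hl := loc_of hfr hp.hand hp.mid
  have he := hfr.entry
  v_entry he
  simp only [depth] at he_room he_stack
  have hRA : g.R + 1480 = (g.e.reg .rsp).toNat := hl.r_ra
  have hfdef : g.f = (g.e.reg .rdi).toNat := rfl
  have hfhi := hl.f_hi
  have hflo := hl.f_lo
  have hfoff : (g.e.reg .rsp).toNat + 8 ≤ g.f ∨ g.f + 1808 ≤ 0x700000 ∨ 0x800000 ≤ g.f := hl.f_off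
  have w_rip := hfr.rip
  have c_rsp : v.reg .rsp = g.e.reg .rsp - 1480 := by
    rw [hfr.rsp]
    exact (eq_addr _ _ (by u_omega)).symm
  have c_rbp : v.reg .rbp = g.e.reg .rdi := by
    rw [hp.rbp]
    exact addr_toNat _
  have w_eq : Mem.EqOn Vorbis.L.textLo Vorbis.L.textHi u₀.mem v.mem := hfr.code
  have hdf : v.flags .df = false := (show abiInv _ from hfr.inv).1
  have hmx : v.mxcsr &&& 0x1F80 = 0x1F80 := (show abiInv _ from hfr.inv).2
  have hsse := Vorbis.sseOK_of_abiInv hfr.inv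
  have herr := h_error A.2 g.frames'
  -- the literal 0 of gcc: dword [rsp + 24H] (Z24)
  have r24 : v.mem.readLE (g.e.reg .rsp - 1444) 4 = 0 := by
    have ea : g.e.reg .rsp - 1444 = addr (g.R + 0x24) := eq_addr _ _ (by u_omega)
    rw [ea]
    exact hp.mid.consts.z24 (by omega) (by omega)
  u_walk hcode [hμ.vendor] until [Vorbis.L.start_decoder.cut189, Vorbis.L.start_decoder.cut192] span [Vorbis.L.textLo, Vorbis.L.textHi] side (v_side)
  · -- 0x115249: the check of the store to f->floor_config
    have hun : ShadowUntouched v.mem s_115249.mem := by v_untouched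
    have hs := hp.mid.bits.site_field hp.mid.env.live 312 8 (by omega) (by omega) rfl
    exact Vorbis.Spec.check_site hfr.shadow hun hs (by u_omega)
  · v_inv
  · -- 0x11530f: the precondition of error(f, VORBIS_outofmem)
    have hun : ShadowUntouched v.mem s_11530f.mem := by v_untouched
    have hrsp : (s_11530f.reg .rsp).toNat + 8 = g.R := by
      rw [w_rsp]
      u_omega
    have hrdi : (s_11530f.reg .rdi).toNat = g.f := by
      rw [w_rdi]
      rfl
    exact hp.errorPre hrsp hun hrdi
  · -- 0x115314: error has returned (eax = 0)
    v_after_call w_rsp_11530f w_mem_11530f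
    simp only [w_rdi_11530f] at w_same
    have eRA : g.RA = (g.e.reg .rsp).toNat := rfl
    have hsame : Mem.SameExcept [⟨(g.e.reg .rsp).toNat - 1888, (g.e.reg .rsp).toNat - 1480⟩,
        ⟨(g.e.reg .rdi).toNat + 312, (g.e.reg .rdi).toNat + 320⟩,
        ⟨(g.e.reg .rdi).toNat + 140, (g.e.reg .rdi).toNat + 144⟩] v.mem s_11530fr.mem := by
      u_same
    have hall : ∀ s, s ∈ [(⟨(g.e.reg .rsp).toNat - 1888, (g.e.reg .rsp).toNat - 1480⟩ : Span),
        ⟨(g.e.reg .rdi).toNat + 312, (g.e.reg .rdi).toNat + 320⟩,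
        ⟨(g.e.reg .rdi).toNat + 140, (g.e.reg .rdi).toNat + 144⟩] → SpanOK g false A.1.B A.1.L s := by
      intro s hs
      simp only [List.mem_cons, List.mem_nil_iff, or_false] at hs
      unfold SpanOK
      rcases hs with rfl | rfl | rfl <;> simp only [] <;> omega
    have hpl := plain_eqOn hl hsame hall
    have hrsp' : s_11530fr.reg .rsp = addr g.R := by
      rw [w_rsp]
      exact eq_addr _ _ (by u_omega)
    have hf2 : g.f + Off.sizeof.stb_vorbis ≤ 2 ^ 64 := by
      simp only [voff]
      omega
    have hbits' : Bits (g.Blk A) g.len s_11530fr.mem g.f := by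
      apply bits_carry hsame ?_ hp.mid.bits
      intro s hs
      simp only [List.mem_cons, List.mem_nil_iff, or_false] at hs
      rcases hs with rfl | rfl | rfl <;> simp only [] <;> omega
    have hfr' : Frame u₀ g Vorbis.L.start_decoder.cut192 A s_11530fr :=
      frame_carry hfr hl hsame hall w_rip hrsp' w_eq (Vorbis.abiInv_of w_df w_mx) (hfr.shadow.untouched hpl.1) hfr.offText
        (Arena.Extends.refl _)
    have hmid' : Mid g 5 5 6 A5 A s_11530fr.mem :=
      mid_step hp.mid hl hsame hall (hp.mid.env.eqOn hpl.1) (hp.mid.arena.frame hf2 hpl.2) hp.mid.noTemps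
        (Arena.Extends.refl _) hbits'
    have hpost : s_11530fr.reg .rax = 0 := w_post.1
    refine ReachVia.done (Or.inr ⟨⟨hfr', hp.hand, hmid', ?_⟩, hpost⟩)
    rw [w_kept .rbp rfl]
    exact hp.rbp
  · -- 0x11526a: floor_config ≠ NULL, the two slots are zeroed: the head of the floor loop
    have eRA : g.RA = (g.e.reg .rsp).toNat := rfl
    have hne : v.reg .rax ≠ 0 := by
      intro h0
      apply hbr_115258
      rw [h0]
      rfl
    have hblk := (halt.resolve_left hne).2
    have hsame : Mem.SameExcept [⟨(g.e.reg .rsp).toNat - 1888, (g.e.reg .rsp).toNat - 1480⟩,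
        ⟨(g.e.reg .rdi).toNat + 312, (g.e.reg .rdi).toNat + 320⟩,
        ⟨(g.e.reg .rsp).toNat - 1440, (g.e.reg .rsp).toNat - 1436⟩,
        ⟨(g.e.reg .rsp).toNat - 1456, (g.e.reg .rsp).toNat - 1452⟩] v.mem s_115266.mem := by
      u_same
    have hall : ∀ s, s ∈ [(⟨(g.e.reg .rsp).toNat - 1888, (g.e.reg .rsp).toNat - 1480⟩ : Span),
        ⟨(g.e.reg .rdi).toNat + 312, (g.e.reg .rdi).toNat + 320⟩,
        ⟨(g.e.reg .rsp).toNat - 1440, (g.e.reg .rsp).toNat - 1436⟩,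
        ⟨(g.e.reg .rsp).toNat - 1456, (g.e.reg .rsp).toNat - 1452⟩] → SpanOK g false A.1.B A.1.L s := by
      intro s hs
      simp only [List.mem_cons, List.mem_nil_iff, or_false] at hs
      unfold SpanOK
      rcases hs with rfl | rfl | rfl | rfl <;> simp only [] <;> omega
    have hpl := plain_eqOn hl hsame hall
    have hrsp' : s_115266.reg .rsp = addr g.R := by
      rw [w_rsp]
      exact eq_addr _ _ (by u_omega)
    have hf2 : g.f + Off.sizeof.stb_vorbis ≤ 2 ^ 64 := by
      simp only [voff]
      omega
    have hbits' : Bits (g.Blk A) g.len s_115266.mem g.f := by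
      apply bits_carry hsame ?_ hp.mid.bits
      intro s hs
      simp only [List.mem_cons, List.mem_nil_iff, or_false] at hs
      rcases hs with rfl | rfl | rfl | rfl <;> simp only [] <;> omega
    have hinv' : abiInv s_115266 := by v_inv
    have hfr' : Frame u₀ g pc_F2 A s_115266 :=
      frame_carry hfr hl hsame hall w_rip hrsp' w_eq hinv' (hfr.shadow.untouched hpl.1) hfr.offText
        (Arena.Extends.refl _)
    have hmid' : Mid g 5 5 6 A5 A s_115266.mem :=
      mid_step hp.mid hl hsame hall (hp.mid.env.eqOn hpl.1) (hp.mid.arena.frame hf2 hpl.2) hp.mid.noTemps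
        (Arena.Extends.refl _) hbits'
    have hrbp' : s_115266.reg .rbp = addr g.f := by
      rw [w_kept .rbp rfl]
      exact hp.rbp
    -- the values of the segment's four stores, read back
    have hcnt : s_115266.mem.u32 (g.R + 0x18) = 0 := by
      have ea : addr (g.R + 0x18) = g.e.reg .rsp - 1456 := (eq_addr _ _ (by u_omega)).symm
      show s_115266.mem.readLE (addr (g.R + 0x18)) 4 = 0
      rw [ea, w_mem]
      u_read
    have hlf : s_115266.mem.u32 (g.R + 0x28) = 0 := by
      have ea : addr (g.R + 0x28) = g.e.reg .rsp - 1440 := (eq_addr _ _ (by u_omega)).symm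
      show s_115266.mem.readLE (addr (g.R + 0x28)) 4 = 0
      rw [ea, w_mem]
      u_read
    have hcfg : stb_vorbis.floor_config s_115266.mem g.f = (v.reg .rax).toNat := by
      have ea : addr (g.f + 312) = g.e.reg .rdi + 312 := by
        rw [← addr_add_lit]
        exact congrArg (· + 312) (addr_toNat _)
      show s_115266.mem.readLE (addr (g.f + 312)) 8 = _
      rw [ea, w_mem]
      u_read
    have hcount : stb_vorbis.floor_count s_115266.mem g.f = stb_vorbis.floor_count v.mem g.f := by
      have e176 : Mem.EqOn (g.f + 176) (g.f + 180) v.mem s_115266.mem := by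
        apply hsame.eqOn
        intro s hs
        simp only [List.mem_cons, List.mem_nil_iff, or_false] at hs
        rcases hs with rfl | rfl | rfl | rfl <;> simp only [] <;> omega
      show s_115266.mem.i32 (g.f + 176) = v.mem.i32 (g.f + 176)
      exact e176.i32 _ (by omega) (by omega) (by omega)
    refine ReachVia.done (Or.inl ?_)
    apply atF2_of ⟨hfr', hp.hand, hmid', hrbp'⟩ hcnt hlf
    · rw [hcount]
      exact hfcb
    · rw [hcfg, hcount]
      exact hblk

/-- **Stage 4** (0x115314, line 3965): `jmp 113b22`, the exit into the single epilogue with eax = 0 (`AtERR`). -/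
theorem stage4 (Lay : Layout) (μ : Microarch) (hμ : UserX.MicroOK μ) (u₀ : State)
    (hcode : HasCodeNat Lay u₀ Vorbis.L.start_decoder.entry Vorbis.Code.code_start_decoder.nat Vorbis.L.start_decoder.size)
    (g : Ghost) (A5 : Arena) (A : Arena × List Obj) (v : State) (hp : Pt u₀ g Vorbis.L.start_decoder.cut192 A5 A v)
    (hrax : v.reg .rax = 0) :
    ReachVia Lay μ Vorbis.WayInv v (fun w => AtF2 u₀ g 0 w ∨ AtERR u₀ g w) := by
  have hfr := hp.frame
  have w_rip := hfr.rip
  have w_eq : Mem.EqOn Vorbis.L.textLo Vorbis.L.textHi u₀.mem v.mem := hfr.code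
  have hdf : v.flags .df = false := (show abiInv _ from hfr.inv).1
  have hmx : v.mxcsr &&& 0x1F80 = 0x1F80 := (show abiInv _ from hfr.inv).2
  have hsse := Vorbis.sseOK_of_abiInv hfr.inv
  u_walk hcode [hμ.vendor] until [Vorbis.L.start_decoder.cut4] span [Vorbis.L.textLo, Vorbis.L.textHi] side (v_side)
  -- 0x113b22: the single epilogue, with eax = 0
  have hinv' : abiInv s_115314 := by v_inv
  have hp' : Pt u₀ g pc_ERR A5 A s_115314 := hp.move w_mem w_rip (w_kept .rsp rfl) (w_kept .rbp rfl) hinv'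
  refine ReachVia.done (Or.inr (atERR_of hp' ?_))
  rw [w_kept .rax rfl]
  exact hrax

end Vorbis.Spec.start_decoder_F1

/-- Segment F1 of `start_decoder` takes its entry assertion `AtF1` to `AtF2 … 0` (the head of the floor loop) or to `AtERR` (the
epilogue, after `error(f, VORBIS_outofmem)`): the four stages chained. -/
theorem Vorbis.Spec.Worked.start_decoder_F1_ok : Vorbis.Spec.start_decoder_F1.Statement := by
  unfold Vorbis.Spec.start_decoder_F1.Statement
  intro Lay hLay μ hμ u₀ hcode h_get_bits h_store4 h_setup_malloc h_store8 h_error g v hat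
  obtain ⟨A, hb⟩ := hat
  have hp := Vorbis.Spec.start_decoder_F1.Pt.of_body hb
  -- 0x11520c → 0x115219
  refine (Vorbis.Spec.start_decoder_F1.stage1 Lay hLay μ hμ u₀ hcode h_get_bits g A v hp).trans ?_
  intro s1 h1
  obtain ⟨hp1, hz⟩ := h1
  -- 0x115219 → 0x11523f
  refine (Vorbis.Spec.start_decoder_F1.stage2 Lay hLay μ hμ u₀ hcode h_store4 h_setup_malloc g A s1 hp1 hz).trans ?_
  intro s2 h2
  obtain ⟨A', hp2, hfcb, halt⟩ := h2
  -- 0x11523f → 0x11526a (exit) or 0x115314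
  refine (Vorbis.Spec.start_decoder_F1.stage3 Lay hLay μ hμ u₀ hcode h_store8 h_error g A.1 A' s2 hp2 hfcb halt).trans ?_
  intro s3 h3
  rcases h3 with h | ⟨hp3, hrax⟩
  · exact X86.User.ReachVia.done (Or.inl h)
  · -- 0x115314 → 0x113b22 (exit)
    exact Vorbis.Spec.start_decoder_F1.stage4 Lay μ hμ u₀ hcode g A.1 A' s3 hp3 hrax
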